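-- pv_equiv track=rewrite | github.com/samirlalvani/g-sqz | HuffmanTree.py | optimize_seq
-- ===== SOURCE A (Python) =====
-- from collections import deque
--
-- def optimize_seq(sep_list, str_list):
--     sep_q = deque(sep_list)
--     str_q = deque(str_list)
--     list_count = 0
--     str_count = 0
--     list_pos = []
--     str_pos = []
--     str_opt = ''
--     while len(str_q) > 0:
--         str_pop = str_q.popleft()
--         if str_pop is None:
--             list_pos.append(list_count)
--             str_pos.append(str_count)
--         else:
--             str_opt += str_pop
--             str_count += len(str_pop)
--         list_count += 1
--         if len(sep_q) > 0:
--             sep_pop = sep_q.popleft()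
--             str_opt += sep_pop
--             str_count += 1
--     return str_opt, list_count, str_count, tuple(list_pos), tuple(str_pos)
-- ===== SOURCE B (Python) =====
-- def optimize_seq(sep_list, str_list):
--     n = len(str_list)
--     m = len(sep_list)
--     list_pos = tuple(i for i, x in enumerate(str_list) if x is None)
--     pref = [0]
--     for i, x in enumerate(str_list):
--         pref.append(pref[-1] + (len(x) if x is not None else 0) + (1 if i < m else 0))
--     str_pos = tuple(pref[i] for i in list_pos)
--     str_opt = ''.join((x if x is not None else '') + (sep_list[i] if i < m else '')
--                       for i, x in enumerate(str_list))
--     return str_opt, n, pref[-1], list_pos, str_pos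
-- ===== Notes on version B (the rewrite author's own statement) =====
-- stated objective: alternative
-- what changed: A's single destructive two-deque loop with five running accumulators is replaced by independent passes: a comprehension collecting the None positions, a cumulative-count prefix list read at those positions (each consumed separator contributing 1), and one ''.join building the merged string.
import Mathlib
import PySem

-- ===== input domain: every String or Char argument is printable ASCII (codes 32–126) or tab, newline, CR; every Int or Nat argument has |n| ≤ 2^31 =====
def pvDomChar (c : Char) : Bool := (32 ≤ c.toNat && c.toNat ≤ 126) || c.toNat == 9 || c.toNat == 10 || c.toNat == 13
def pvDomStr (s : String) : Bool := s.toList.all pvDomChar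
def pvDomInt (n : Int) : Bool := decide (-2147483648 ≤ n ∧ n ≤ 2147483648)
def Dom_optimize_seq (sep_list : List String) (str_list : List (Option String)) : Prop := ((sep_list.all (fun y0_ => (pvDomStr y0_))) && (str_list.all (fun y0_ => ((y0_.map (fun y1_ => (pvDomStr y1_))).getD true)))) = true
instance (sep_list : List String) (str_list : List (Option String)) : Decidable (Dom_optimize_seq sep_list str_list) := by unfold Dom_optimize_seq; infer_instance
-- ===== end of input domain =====

-- B replaces A's single destructive two-queue loop by independent passes: a comprehension for the
-- none positions, a cumulative-count prefix list read at those positions, and one join; objective: simpler decomposition, same cost.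

-- ===== PORT A =====
-- A's while-loop over the two deques; string concatenation is carried as List Char (exact) and packed by String.ofList at the end.
def optimizeSeqLoop : List String → List (Option String) → List Char → Int → Int → List Int → List Int → String × Int × Int × List Int × List Int
  | _, [], strOpt, listCount, strCount, listPos, strPos =>
      (String.ofList strOpt, listCount, strCount, listPos, strPos)
  | sepQ, strPop :: strQ, strOpt, listCount, strCount, listPos, strPos =>
      let st :=
        match strPop with
        | none => (strOpt, strCount, listPos ++ [listCount], strPos ++ [strCount])
        | some s => (strOpt ++ s.toList, strCount + PySem.Str.len s, listPos, strPos)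
      match st with
      | (strOpt, strCount, listPos, strPos) =>
        match sepQ with
        | [] => optimizeSeqLoop [] strQ strOpt (listCount + 1) strCount listPos strPos
        | sepPop :: sepQ' =>
            optimizeSeqLoop sepQ' strQ (strOpt ++ sepPop.toList) (listCount + 1) (strCount + 1) listPos strPos

def optimize_seq (sep_list : List String) (str_list : List (Option String)) : String × Int × Int × List Int × List Int :=
  optimizeSeqLoop sep_list str_list [] 0 0 [] []

-- ===== PORT B =====
-- Source B: list_pos by comprehension over enumerate, pref by an appending loop reading pref[-1],
-- str_pos by indexing pref, str_opt by ''.join (ported as flatten over List Char, exact).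
def optimize_seq_alt (sep_list : List String) (str_list : List (Option String)) : String × Int × Int × List Int × List Int :=
  let n : Int := str_list.length
  let m : Int := sep_list.length
  let list_pos : List Int :=
    (PySem.List.enumerate str_list).filterMap (fun p => if p.2 = none then some p.1 else none)
  let pref : List Int :=
    (PySem.List.enumerate str_list).foldl
      (fun pref p =>
        pref ++ [PySem.List.pyGetD pref (-1) 0 +
          (match p.2 with | some x => PySem.Str.len x | none => 0) +
          (if p.1 < m then 1 else 0)]) [0]
  let str_pos : List Int := list_pos.map (fun i => PySem.List.pyGetD pref i 0)
  let str_opt : String :=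
    String.ofList (((PySem.List.enumerate str_list).map
      (fun p => (match p.2 with | some x => x.toList | none => []) ++
        (if p.1 < m then (PySem.List.pyGetD sep_list p.1 "").toList else []))).flatten)
  (str_opt, n, PySem.List.pyGetD pref (-1) 0, list_pos, str_pos)

-- ===== PRECONDITION & SPEC =====
def Spec_optimize_seq (sep_list : List String) (str_list : List (Option String)) (out : String × Int × Int × List Int × List Int) : Prop := out = optimize_seq_alt sep_list str_list
instance (sep_list : List String) (str_list : List (Option String)) (out : String × Int × Int × List Int × List Int) : Decidable (Spec_optimize_seq sep_list str_list out) := by unfold Spec_optimize_seq; infer_instance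

-- ===== CLAIM (what is proved, stated in full; the proofs are below) =====
def Claim_equal_optimize_seq : Prop := ∀ (sep_list : List String) (str_list : List (Option String)), Dom_optimize_seq sep_list str_list → Spec_optimize_seq sep_list str_list (optimize_seq sep_list str_list)

-- ===== LEMMAS AND PROOFS =====

-- closed-form building blocks (proof helpers only)
def pcs : Option String → List Char
  | none => []
  | some s => s.toList

def plen : Option String → Int
  | none => 0
  | some s => PySem.Str.len s

-- per-item increment of str_count given the remaining separator queue
def stepInc (sepQ : List String) (x : Option String) : Int :=
  plen x + (if sepQ = [] then 0 else 1)

-- joined characters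
def Jcf : List String → List (Option String) → List Char
  | _, [] => []
  | sepQ, x :: rest =>
      pcs x ++ (match sepQ with | [] => [] | s0 :: _ => s0.toList) ++ Jcf sepQ.tail rest

-- total str_count delta
def Tcf : List String → List (Option String) → Int
  | _, [] => 0
  | sepQ, x :: rest => stepInc sepQ x + Tcf sepQ.tail rest

-- 0-based positions of the none entries
def NPcf : List (Option String) → List Nat
  | [] => []
  | x :: rest => (if x = none then [0] else []) ++ (NPcf rest).map (· + 1)

-- cumulative str_count at each none entry
def SPcf : List String → List (Option String) → List Int
  | _, [] => []
  | sepQ, x :: rest =>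
      (if x = none then [0] else []) ++ (SPcf sepQ.tail rest).map (· + stepInc sepQ x)

-- running prefix values (one per item), starting from v
def Pcf : List String → List (Option String) → Int → List Int
  | _, [], _ => []
  | sepQ, x :: rest, v => (v + stepInc sepQ x) :: Pcf sepQ.tail rest (v + stepInc sepQ x)

def npInt (l : List Nat) (a : Int) : List Int := l.map (fun (k : Nat) => (k : Int) + a)

def spShift (l : List Int) (a : Int) : List Int := l.map (fun v => v + a)

theorem npInt_nil (a : Int) : npInt [] a = [] := rfl

theorem npInt_cons (k : Nat) (l : List Nat) (a : Int) :
    npInt (k :: l) a = ((k : Int) + a) :: npInt l a := rfl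

theorem spShift_cons (w : Int) (l : List Int) (a : Int) :
    spShift (w :: l) a = (w + a) :: spShift l a := rfl

theorem npInt_append (l1 l2 : List Nat) (a : Int) : npInt (l1 ++ l2) a = npInt l1 a ++ npInt l2 a := by
  simp [npInt]

theorem npInt_single0 (a : Int) : npInt [0] a = [a] := by simp [npInt]

theorem npInt_shift (l : List Nat) (a : Int) :
    npInt ((l.map (fun k => k + 1) : List Nat)) a = npInt l (a + 1) := by
  unfold npInt
  rw [List.map_map]
  apply List.map_congr_left
  intro k _
  simp only [Function.comp_apply]
  push_cast
  ring

theorem npInt_zero (l : List Nat) : npInt l 0 = l.map (fun (k : Nat) => (k : Int)) := by simp [npInt]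

theorem spShift_nil (a : Int) : spShift [] a = [] := rfl

theorem spShift_append (l1 l2 : List Int) (a : Int) :
    spShift (l1 ++ l2) a = spShift l1 a ++ spShift l2 a := by simp [spShift]

theorem spShift_single0 (a : Int) : spShift [0] a = [a] := by simp [spShift]

theorem spShift_shift (l : List Int) (a b : Int) :
    spShift (l.map (fun v => v + b)) a = spShift l (a + b) := by
  unfold spShift
  rw [List.map_map]
  apply List.map_congr_left
  intro v _
  simp only [Function.comp_apply]
  ring

theorem loop_closed (strQ : List (Option String)) :
    ∀ (sepQ : List String) (co : List Char) (lc sc : Int) (lp sp : List Int),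
      optimizeSeqLoop sepQ strQ co lc sc lp sp =
        (String.ofList (co ++ Jcf sepQ strQ), lc + strQ.length, sc + Tcf sepQ strQ,
         lp ++ npInt (NPcf strQ) lc, sp ++ spShift (SPcf sepQ strQ) sc) := by
  induction strQ with
  | nil =>
      intro sepQ co lc sc lp sp
      simp [optimizeSeqLoop, Jcf, Tcf, NPcf, SPcf, npInt, spShift]
  | cons x rest ih =>
      intro sepQ co lc sc lp sp
      cases x with
      | none =>
          cases sepQ with
          | nil =>
              show optimizeSeqLoop [] rest co (lc + 1) sc (lp ++ [lc]) (sp ++ [sc]) = _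
              rw [ih]
              simp only [Prod.mk.injEq]
              refine ⟨?_, ?_, ?_, ?_, ?_⟩
              · simp [Jcf, pcs]
              · push_cast [List.length_cons]; ring
              · simp [Tcf, stepInc, plen]
              · simp [NPcf, npInt_cons, npInt_append, npInt_shift, npInt_single0, List.append_assoc]
              · simp [SPcf, stepInc, plen, spShift_cons, spShift_append, spShift_shift, spShift_single0,
                  List.append_assoc]
          | cons sepPop sepQ' =>
              show optimizeSeqLoop sepQ' rest (co ++ sepPop.toList) (lc + 1) (sc + 1) (lp ++ [lc]) (sp ++ [sc]) = _
              rw [ih]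
              simp only [Prod.mk.injEq]
              refine ⟨?_, ?_, ?_, ?_, ?_⟩
              · simp [Jcf, pcs]
              · push_cast [List.length_cons]; ring
              · simp [Tcf, stepInc, plen]; ring
              · simp [NPcf, npInt_cons, npInt_append, npInt_shift, npInt_single0, List.append_assoc]
              · simp [SPcf, stepInc, plen, spShift_cons, spShift_append, spShift_shift, spShift_single0,
                  List.append_assoc]
      | some s =>
          cases sepQ with
          | nil =>
              show optimizeSeqLoop [] rest (co ++ s.toList) (lc + 1) (sc + PySem.Str.len s) lp sp = _
              rw [ih]
              simp only [Prod.mk.injEq]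
              refine ⟨?_, ?_, ?_, ?_, ?_⟩
              · simp [Jcf, pcs]
              · push_cast [List.length_cons]; ring
              · simp [Tcf, stepInc, plen]; ring
              · simp [NPcf, npInt_cons, npInt_append, npInt_shift, npInt_single0, List.append_assoc]
              · simp [SPcf, stepInc, plen, spShift_cons, spShift_append, spShift_shift, spShift_single0,
                  List.append_assoc, add_assoc]
          | cons sepPop sepQ' =>
              show optimizeSeqLoop sepQ' rest (co ++ s.toList ++ sepPop.toList) (lc + 1) (sc + PySem.Str.len s + 1) lp sp = _
              rw [ih]
              simp only [Prod.mk.injEq]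
              refine ⟨?_, ?_, ?_, ?_, ?_⟩
              · simp [Jcf, pcs, List.append_assoc]
              · push_cast [List.length_cons]; ring
              · simp [Tcf, stepInc, plen]; ring
              · simp [NPcf, npInt_cons, npInt_append, npInt_shift, npInt_single0, List.append_assoc]
              · simp [SPcf, stepInc, plen, spShift_cons, spShift_append, spShift_shift, spShift_single0,
                  List.append_assoc, add_assoc]

theorem np_lemma (xs : List (Option String)) : ∀ (s : Nat),
    (PySem.List.enumerate xs (s : Int)).filterMap (fun p => if p.2 = none then some p.1 else none)
      = npInt (NPcf xs) (s : Int) := by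
  induction xs with
  | nil => intro s; simp [NPcf, PySem.List.enumerate_nil, npInt_nil]
  | cons x rest ih =>
      intro s
      rw [PySem.List.enumerate_cons]
      have hcast : (s : Int) + 1 = ((s + 1 : Nat) : Int) := by push_cast; ring
      rw [List.filterMap_cons, hcast, ih (s + 1)]
      by_cases hx : x = none
      · subst hx
        simp [NPcf, npInt_cons, npInt_shift]
      · simp [NPcf, hx, npInt_shift]

theorem pref_lemma (sep : List String) (xs : List (Option String)) : ∀ (s : Nat) (acc : List Int) (v : Int),
    (PySem.List.enumerate xs (s : Int)).foldl
      (fun pref p =>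
        pref ++ [PySem.List.pyGetD pref (-1) 0 +
          (match p.2 with | some x => PySem.Str.len x | none => 0) +
          (if p.1 < (sep.length : Int) then 1 else 0)]) (acc ++ [v])
      = acc ++ [v] ++ Pcf (sep.drop s) xs v := by
  induction xs with
  | nil => intro s acc v; simp [PySem.List.enumerate_nil, Pcf]
  | cons x rest ih =>
      intro s acc v
      rw [PySem.List.enumerate_cons, List.foldl_cons]
      have hstep : (match x with | some y => PySem.Str.len y | none => (0 : Int)) = plen x := by
        cases x <;> rfl
      have hif : (if (s : Int) < (sep.length : Int) then (1 : Int) else 0)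
          = (if sep.drop s = [] then 0 else 1) := by
        by_cases hs : s < sep.length
        · rw [if_pos (by exact_mod_cast hs), if_neg (by simp [List.drop_eq_nil_iff]; omega)]
        · rw [if_neg (by exact_mod_cast hs), if_pos (by simp [List.drop_eq_nil_iff]; omega)]
      have hcast : (s : Int) + 1 = ((s + 1 : Nat) : Int) := by push_cast; ring
      rw [PySem.List.pyGetD_neg_one_append_singleton, hstep, hif, hcast,
        show acc ++ [v] ++ [v + plen x + if sep.drop s = [] then 0 else 1]
          = (acc ++ [v]) ++ [v + (plen x + if sep.drop s = [] then 0 else 1)] from by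
            simp [List.append_assoc, add_assoc],
        ih (s + 1) (acc ++ [v]) (v + (plen x + if sep.drop s = [] then 0 else 1))]
      show _ = acc ++ [v] ++ Pcf (sep.drop s) (x :: rest) v
      simp only [Pcf, stepInc, List.tail_drop, List.append_assoc, List.singleton_append,
        List.cons_append, List.nil_append]

theorem last_lemma (xs : List (Option String)) : ∀ (sepQ : List String) (v : Int) (acc : List Int),
    PySem.List.pyGetD (acc ++ v :: Pcf sepQ xs v) (-1) 0 = v + Tcf sepQ xs := by
  induction xs with
  | nil =>
      intro sepQ v acc
      simp only [Pcf, Tcf]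
      rw [PySem.List.pyGetD_neg_one_append_singleton]
      ring
  | cons x rest ih =>
      intro sepQ v acc
      simp only [Pcf, Tcf]
      rw [show acc ++ v :: (v + stepInc sepQ x) :: Pcf sepQ.tail rest (v + stepInc sepQ x)
          = (acc ++ [v]) ++ (v + stepInc sepQ x) :: Pcf sepQ.tail rest (v + stepInc sepQ x) from by
            simp [List.append_assoc],
        ih sepQ.tail (v + stepInc sepQ x) (acc ++ [v])]
      ring

theorem sp_lemma (xs : List (Option String)) : ∀ (sepQ : List String) (v : Int),
    (NPcf xs).map (fun (k : Nat) => PySem.List.pyGetD (v :: Pcf sepQ xs v) ((k : Int)) 0)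
      = spShift (SPcf sepQ xs) v := by
  induction xs with
  | nil => intro sepQ v; simp [NPcf, SPcf, spShift_nil]
  | cons x rest ih =>
      intro sepQ v
      have hmaps : ∀ (l : List Nat) (M : List Int) (w : Int),
          ((l.map (fun k => k + 1) : List Nat)).map
              (fun (k : Nat) => PySem.List.pyGetD (w :: M) ((k : Int)) 0)
            = l.map (fun (k : Nat) => PySem.List.pyGetD M ((k : Int)) 0) := by
        intro l M w
        rw [List.map_map]
        apply List.map_congr_left
        intro k _
        simp only [Function.comp_apply, PySem.List.pyGetD_natCast]
        simp
      simp only [NPcf, SPcf, Pcf, List.map_append, hmaps, ih sepQ.tail (v + stepInc sepQ x),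
        spShift_append, spShift_shift]
      by_cases hx : x = none
      · simp [hx, spShift_cons, spShift_nil, PySem.List.pyGetD_natCast]
      · simp [hx, spShift_nil]

theorem join_lemma (sep : List String) (xs : List (Option String)) : ∀ (s : Nat),
    (((PySem.List.enumerate xs (s : Int)).map
      (fun p => (match p.2 with | some x => x.toList | none => []) ++
        (if p.1 < (sep.length : Int) then (PySem.List.pyGetD sep p.1 "").toList else []))).flatten)
      = Jcf (sep.drop s) xs := by
  induction xs with
  | nil => intro s; simp [PySem.List.enumerate_nil, Jcf]
  | cons x rest ih =>
      intro s
      rw [PySem.List.enumerate_cons]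
      simp only [List.map_cons, List.flatten_cons]
      have hcast : (s : Int) + 1 = ((s + 1 : Nat) : Int) := by push_cast; ring
      rw [hcast, ih (s + 1)]
      have hx : (match x with | some y => y.toList | none => ([] : List Char)) = pcs x := by
        cases x <;> rfl
      have hsep : (if (s : Int) < (sep.length : Int) then (PySem.List.pyGetD sep ((s : Int)) "").toList else [])
          = (match sep.drop s with | [] => [] | s0 :: _ => s0.toList) := by
        by_cases hs : s < sep.length
        · rw [if_pos (by exact_mod_cast hs)]
          rw [List.drop_eq_getElem_cons hs]
          simp [PySem.List.pyGetD_natCast, List.getElem?_eq_getElem, hs]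
        · rw [if_neg (by exact_mod_cast hs)]
          rw [List.drop_eq_nil_iff.mpr (by omega)]
      rw [hx, hsep]
      simp only [Jcf, List.tail_drop, List.append_assoc]

theorem strpos_bridge (sep : List String) (str : List (Option String)) :
    (npInt (NPcf str) 0).map (fun i => PySem.List.pyGetD ((0 : Int) :: Pcf sep str 0) i 0)
      = spShift (SPcf sep str) 0 := by
  rw [npInt_zero, List.map_map]
  rw [show ((fun i => PySem.List.pyGetD ((0 : Int) :: Pcf sep str 0) i 0) ∘ fun (k : Nat) => (k : Int))
      = (fun (k : Nat) => PySem.List.pyGetD ((0 : Int) :: Pcf sep str 0) ((k : Int)) 0) from rfl]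
  exact sp_lemma str sep 0

-- ===== VERDICT (by name: the statement is the Claim_ definition above) =====
theorem optimize_seq_spec : Claim_equal_optimize_seq := by
  intro sep str _
  unfold Spec_optimize_seq
  simp only [optimize_seq, optimize_seq_alt]
  rw [loop_closed]
  have hnp := np_lemma str 0
  have hpref := pref_lemma sep str 0 [] 0
  have hjoin := join_lemma sep str 0
  simp only [Nat.cast_zero, List.drop_zero, List.nil_append] at hnp hpref hjoin
  rw [hnp, hpref, hjoin]
  have hlast := last_lemma str sep 0 []
  simp only [List.nil_append, zero_add] at hlast
  rw [show ([(0 : Int)] ++ Pcf sep str 0) = (0 : Int) :: Pcf sep str 0 from by simp,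
    hlast, strpos_bridge]
  simp only [Prod.mk.injEq]
  refine ⟨by simp, by simp, by simp, by simp, rfl⟩
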